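-- pv_equiv track=rewrite | github.com/adhithyan15/coding-adventures | code/packages/python/starlark-compiler/src/starlark_compiler/compiler.py | _parse_string_literal
-- ===== SOURCE A (Python) =====
-- def _parse_string_literal(s: str) -> str:
--     """Parse a string literal, stripping quotes and handling escapes."""
--     # Strip outer quotes (single, double, or triple-quoted)
--     if s.startswith('"""') or s.startswith("'''"):
--         s = s[3:-3]
--     elif s.startswith('"') or s.startswith("'"):
--         s = s[1:-1]
--
--     # Handle basic escape sequences
--     result = []
--     i = 0
--     while i < len(s):
--         if s[i] == "\\" and i + 1 < len(s):
--             c = s[i + 1]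
--             if c == "n":
--                 result.append("\n")
--             elif c == "t":
--                 result.append("\t")
--             elif c == "\\":
--                 result.append("\\")
--             elif c == '"':
--                 result.append('"')
--             elif c == "'":
--                 result.append("'")
--             elif c == "r":
--                 result.append("\r")
--             elif c == "0":
--                 result.append("\0")
--             else:
--                 result.append("\\")
--                 result.append(c)
--             i += 2
--         else:
--             result.append(s[i])
--             i += 1
--
--     return "".join(result)
-- ===== SOURCE B (Python) =====
-- import re
--
-- _ESCAPES = {"n": "\n", "t": "\t", "\\": "\\", '"': '"', "'": "'", "r": "\r", "0": "\0"}
--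
--
-- def _parse_string_literal(s: str) -> str:
--     """Parse a string literal, stripping quotes and handling escapes."""
--     if s.startswith('"""') or s.startswith("'''"):
--         s = s[3:-3]
--     elif s.startswith('"') or s.startswith("'"):
--         s = s[1:-1]
--     return re.sub(
--         r"\\(.)",
--         lambda m: _ESCAPES.get(m.group(1), "\\" + m.group(1)),
--         s,
--         flags=re.DOTALL,
--     )
-- ===== Notes on version B (the rewrite author's own statement) =====
-- stated objective: idiomatic
-- what changed: Replaces the hand-indexed while-loop with a single re.sub over the pattern backslash+any-char, decoding via an escape-mapping dict lookup in the replacement function.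
import Mathlib
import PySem

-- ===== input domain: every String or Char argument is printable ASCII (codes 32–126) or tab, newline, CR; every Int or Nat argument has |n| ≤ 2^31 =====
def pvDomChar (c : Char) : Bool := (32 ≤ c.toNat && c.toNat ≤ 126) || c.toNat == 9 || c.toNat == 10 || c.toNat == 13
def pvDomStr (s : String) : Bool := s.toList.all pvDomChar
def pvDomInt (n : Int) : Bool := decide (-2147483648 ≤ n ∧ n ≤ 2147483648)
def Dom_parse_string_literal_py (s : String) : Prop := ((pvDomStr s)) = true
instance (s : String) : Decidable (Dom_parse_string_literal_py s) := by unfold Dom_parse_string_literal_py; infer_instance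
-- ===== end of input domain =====

-- B replaces A's hand-indexed while-loop with a regex substitution over backslash+char
-- driven by an escape-mapping dict (objective: idiomatic; return value only, no mutation).

-- ===== PORT A =====
-- A's while-loop: result accumulator, index advanced by 2 on a backslash with a lookahead
-- character, else by 1; here the index/lookahead pair is the head of the remaining list.
def pa_loop (acc : List Char) (cs : List Char) : List Char :=
  match cs with
  | [] => acc
  | c :: d :: rest =>                     -- i < len s, and i+1 < len s iff a second char exists
    if c == '\\' then
      let app :=
        if d == 'n' then ['\n']
        else if d == 't' then ['\t']
        else if d == '\\' then ['\\']
        else if d == '"' then ['"']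
        else if d == '\'' then ['\'']
        else if d == 'r' then ['\r']
        else if d == '0' then [Char.ofNat 0]
        else ['\\', d]
      pa_loop (acc ++ app) rest           -- i += 2
    else pa_loop (acc ++ [c]) (d :: rest) -- i += 1
  | [c] => acc ++ [c]                     -- last char: the 'i + 1 < len(s)' guard fails

def parse_string_literal_py (s : String) : String :=
  let s1 :=
    if PySem.Str.startswith s "\"\"\"" || PySem.Str.startswith s "'''" then
      PySem.Str.slice s (some 3) (some (-3))
    else if PySem.Str.startswith s "\"" || PySem.Str.startswith s "'" then
      PySem.Str.slice s (some 1) (some (-1))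
    else s
  String.ofList (pa_loop [] s1.toList)

-- ===== PORT B =====
-- B's escape table (a Python dict in Source B).
def pb_escapes : PySem.Dict Char Char :=
  PySem.Dict.ofList [('n', '\n'), ('t', '\t'), ('\\', '\\'), ('"', '"'),
                     ('\'', '\''), ('r', '\r'), ('0', Char.ofNat 0)]

-- Hand port of re.sub(r'\\(.)', repl, s, flags=re.DOTALL): exact, since the pattern's
-- non-overlapping left-to-right matches are precisely "a backslash and the next char";
-- repl is the dict lookup with default backslash+char; unmatched text is copied.
def pb_sub (cs : List Char) : List Char :=
  match cs with
  | '\\' :: c :: rest =>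
      (match PySem.Dict.get? pb_escapes c with
       | some r => [r]
       | none => ['\\', c]) ++ pb_sub rest
  | c :: rest => c :: pb_sub rest
  | [] => []

def parse_string_literal_py_alt (s : String) : String :=
  let s1 :=
    if PySem.Str.startswith s "\"\"\"" || PySem.Str.startswith s "'''" then
      PySem.Str.slice s (some 3) (some (-3))
    else if PySem.Str.startswith s "\"" || PySem.Str.startswith s "'" then
      PySem.Str.slice s (some 1) (some (-1))
    else s
  String.ofList (pb_sub s1.toList)

-- ===== PRECONDITION & SPEC =====
def Spec_parse_string_literal_py (s : String) (out : String) : Prop := out = parse_string_literal_py_alt s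
instance (s : String) (out : String) : Decidable (Spec_parse_string_literal_py s out) := by unfold Spec_parse_string_literal_py; infer_instance

-- ===== CLAIM (what is proved, stated in full; the proofs are below) =====
def Claim_equal_parse_string_literal_py : Prop := ∀ (s : String), Dom_parse_string_literal_py s → Spec_parse_string_literal_py s (parse_string_literal_py s)

-- ===== LEMMAS AND PROOFS =====
theorem hmk_pb_escapes : pb_escapes = PySem.Dict.mk [('n', '\n'), ('t', '\t'), ('\\', '\\'),
    ('"', '"'), ('\'', '\''), ('r', '\r'), ('0', Char.ofNat 0)] := by rfl

theorem pa_loop_eq_pb_sub (acc : List Char) (cs : List Char) :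
    pa_loop acc cs = acc ++ pb_sub cs := by
  fun_induction pa_loop acc cs with
  | case1 acc => simp [pb_sub]
  | case2 acc c d rest hc app ih =>
    rw [ih]
    have hc' : c = '\\' := by simpa using hc
    subst hc'
    simp only [pb_sub, app, hmk_pb_escapes, PySem.Dict.get?_mk_cons]
    by_cases h1 : d = 'n'
    · subst h1; simp
    · by_cases h2 : d = 't'
      · subst h2; simp
      · by_cases h3 : d = '\\'
        · subst h3; simp
        · by_cases h4 : d = '"'
          · subst h4; simp
          · by_cases h5 : d = '\''
            · subst h5; simp
            · by_cases h6 : d = 'r'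
              · subst h6; simp
              · by_cases h7 : d = '0'
                · subst h7; simp
                · simp [h1, h2, h3, h4, h5, h6, h7, Ne.symm h1, Ne.symm h2, Ne.symm h3,
                        Ne.symm h4, Ne.symm h5, Ne.symm h6, Ne.symm h7, PySem.Dict.get?]
  | case3 acc c d rest hc ih =>
    rw [ih]
    have hc' : ¬ c = '\\' := by simpa using hc
    have hc' : ¬ c = '\\' := by simpa using hc
    rw [show pb_sub (c :: d :: rest) = c :: pb_sub (d :: rest) by
      rw [pb_sub.eq_def]; split
      · simp_all
      · rename_i heq; injection heq with h1 h2; subst h1; subst h2; rfl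
      · simp_all]
    simp
  | case4 acc c => simp [pb_sub]

-- ===== VERDICT (by name: the statement is the Claim_ definition above) =====
theorem parse_string_literal_py_spec : Claim_equal_parse_string_literal_py := by
  intro s _
  unfold Spec_parse_string_literal_py parse_string_literal_py parse_string_literal_py_alt
  simp only [pa_loop_eq_pb_sub, List.nil_append]
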